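-- pv_equiv track=rewrite | github.com/RinRinPARK/Algorithm | backTracking/2661.py | check
-- ===== SOURCE A (Python) =====
-- def check(s):
--     l = len(s)
--     for idx in range(l-1, -1, -1):
--         tmp = s[idx:l]
--         if len(tmp) * 2 <= len(s):
--             if tmp == s[idx-len(tmp):idx]:
--                 return False
--         else:
--             return True
-- ===== SOURCE B (Python) =====
-- def check(s):
--     n = len(s)
--     if n == 0:
--         return None
--     r = s[::-1]
--     # Z-array of the reversed string: z[i] = length of the longest common
--     # prefix of r and r[i:], computed in O(n).
--     z = [0] * n
--     zl, zr = 0, 0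
--     for i in range(1, n):
--         v = min(zr - i, z[i - zl]) if i < zr else 0
--         while i + v < n and r[v] == r[i + v]:
--             v += 1
--         z[i] = v
--         if i + v > zr:
--             zl, zr = i, i + v
--     return not any(z[k] >= k for k in range(1, n // 2 + 1))
-- ===== Notes on version B (the rewrite author's own statement) =====
-- stated objective: faster
-- what changed: A compares a length-k suffix block against the preceding block by slicing for every k, which is quadratic; B reverses the string once, builds its Z-array in linear time, and reads each block comparison off as z[k] >= k.
import Mathlib
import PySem

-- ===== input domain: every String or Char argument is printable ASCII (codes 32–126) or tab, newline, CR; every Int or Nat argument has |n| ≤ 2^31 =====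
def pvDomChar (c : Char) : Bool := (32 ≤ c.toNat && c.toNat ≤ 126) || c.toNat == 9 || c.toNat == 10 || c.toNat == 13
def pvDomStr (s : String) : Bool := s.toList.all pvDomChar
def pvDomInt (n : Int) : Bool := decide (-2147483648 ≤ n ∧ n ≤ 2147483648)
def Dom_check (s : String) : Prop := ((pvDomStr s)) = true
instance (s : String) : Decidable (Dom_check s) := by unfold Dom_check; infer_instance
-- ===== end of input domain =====

-- B replaces A's quadratic suffix-block comparisons by a single Z-array of the
-- reversed string, answering each block query in O(1); objective: faster.

-- ===== PORT A =====
-- A's loop 'for idx in range(l-1, -1, -1)' with early returns, step for step.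
def checkGo (t : List Char) (l : Int) : List Int → Option Bool
  | [] => none
  | idx :: rest =>
    let tmp := PySem.List.slice t (some idx) (some l)
    if (tmp.length : Int) * 2 ≤ (t.length : Int) then
      if tmp = PySem.List.slice t (some (idx - (tmp.length : Int))) (some idx) then some false
      else checkGo t l rest
    else some true

def check (s : String) : Option Bool :=
  let t := s.toList
  let l : Int := (t.length : Int)
  checkGo t l (PySem.List.pyRange (l - 1) (-1) (-1))

-- ===== PORT B =====
-- Source B's inner 'while i+v < n and r[v] == r[i+v]: v += 1'.  Both indexed reads are
-- in range whenever the guard holds (v ≤ i+v < n), so the getD default is never used.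
def extendZ (r : List Char) (i v : Nat) : Nat :=
  if h : i + v < r.length ∧ r.getD v ' ' = r.getD (i + v) ' ' then
    extendZ r i (v + 1)
  else v
termination_by r.length - (i + v)
decreasing_by omega

-- one iteration of Source B's 'for i in range(1, n)' over the state (z, zl, zr)
def zstep (r : List Char) (st : List Nat × Nat × Nat) (i : Nat) : List Nat × Nat × Nat :=
  let v0 := if i < st.2.2 then min (st.2.2 - i) (st.1.getD (i - st.2.1) 0) else 0
  let v := extendZ r i v0
  let z' := st.1.set i v
  if st.2.2 < i + v then (z', i, i + v) else (z', st.2.1, st.2.2)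

def check_alt (s : String) : Option Bool :=
  let t := s.toList
  let n := t.length
  if n = 0 then none
  else
    let r := t.reverse
    let st := (List.range' 1 (n - 1)).foldl (zstep r) (List.replicate n 0, 0, 0)
    some (!((List.range' 1 (n / 2)).any (fun k => decide (k ≤ st.1.getD k 0))))

-- ===== PRECONDITION & SPEC =====
def Spec_check (s : String) (out : Option Bool) : Prop := out = check_alt s
instance (s : String) (out : Option Bool) : Decidable (Spec_check s out) := by unfold Spec_check; infer_instance

-- ===== CLAIM (what is proved, stated in full; the proofs are below) =====
def Claim_equal_check : Prop := ∀ (s : String), Dom_check s → Spec_check s (check s)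

-- ===== LEMMAS AND PROOFS =====

-- longest common prefix of two lists
def lcp : List Char → List Char → Nat
  | a :: as, b :: bs => if a = b then lcp as bs + 1 else 0
  | _, _ => 0

theorem lcp_nil_right (a : List Char) : lcp a [] = 0 := by cases a <;> rfl

theorem lcp_le_left (a b : List Char) : lcp a b ≤ a.length := by
  induction a generalizing b with
  | nil => simp [lcp]
  | cons x xs ih =>
    cases b with
    | nil => simp [lcp_nil_right]
    | cons y ys => simp only [lcp]; split <;> simp; exact ih ys

theorem lcp_le_right (a b : List Char) : lcp a b ≤ b.length := by
  induction a generalizing b with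
  | nil => simp [lcp]
  | cons x xs ih =>
    cases b with
    | nil => simp [lcp_nil_right]
    | cons y ys => simp only [lcp]; split <;> simp; · exact ih ys

theorem lcp_get (a b : List Char) (t : Nat) (h : t < lcp a b) : a[t]? = b[t]? := by
  induction a generalizing b t with
  | nil => simp [lcp] at h
  | cons x xs ih =>
    cases b with
    | nil => simp [lcp_nil_right] at h
    | cons y ys =>
      simp only [lcp] at h
      split at h
      · cases t with
        | zero => simp_all
        | succ t' => simpa using ih ys t' (by omega)
      · omega

theorem lcp_ge (a b : List Char) (m : Nat) (ha : m ≤ a.length) (hb : m ≤ b.length)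
    (h : ∀ t < m, a[t]? = b[t]?) : m ≤ lcp a b := by
  induction m generalizing a b with
  | zero => omega
  | succ m' ih =>
    cases a with
    | nil => simp at ha
    | cons x xs =>
      cases b with
      | nil => simp at hb
      | cons y ys =>
        have h0 := h 0 (by omega)
        simp at h0
        simp only [lcp, h0, if_true]
        have := ih xs ys (by simpa using ha) (by simpa using hb)
          (fun t ht => by simpa using h (t+1) (by omega))
        omega

theorem lcp_add (a b : List Char) (m : Nat) (h : m ≤ lcp a b) :
    lcp a b = m + lcp (a.drop m) (b.drop m) := by
  induction m generalizing a b with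
  | zero => simp
  | succ m' ih =>
    cases a with
    | nil => simp [lcp] at h
    | cons x xs =>
      cases b with
      | nil => simp [lcp_nil_right] at h
      | cons y ys =>
        simp only [lcp] at h ⊢
        split at h
        · rename_i he
          simp only [he, if_true, List.drop_succ_cons]
          have := ih xs ys (by omega)
          omega
        · omega

theorem extendZ_eq (r : List Char) (i v : Nat) :
    extendZ r i v = v + lcp (r.drop v) (r.drop (i + v)) := by
  have H : ∀ fuel v, r.length - (i + v) ≤ fuel →
      extendZ r i v = v + lcp (r.drop v) (r.drop (i + v)) := by
    intro fuel
    induction fuel with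
    | zero =>
      intro v hv
      rw [extendZ]
      split
      · rename_i h; exact absurd h.1 (by omega)
      · rw [show r.drop (i + v) = [] from List.drop_eq_nil_of_le (by omega), lcp_nil_right]
        omega
    | succ f ih =>
      intro v hv
      rw [extendZ]
      split
      · rename_i h
        rw [ih (v + 1) (by omega)]
        have hv1 : v < r.length := by omega
        have hiv : i + v < r.length := h.1
        rw [List.drop_eq_getElem_cons hv1, List.drop_eq_getElem_cons hiv]
        have hc : r[v] = r[i + v] := by
          have h2 := h.2
          rwa [List.getD_eq_getElem r ' ' hv1, List.getD_eq_getElem r ' ' hiv] at h2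
        simp only [lcp, hc, if_true]
        have e : i + (v + 1) = i + v + 1 := by omega
        rw [e]
        omega
      · rename_i h
        push Not at h
        by_cases hlt : i + v < r.length
        · have hne := h hlt
          rw [List.drop_eq_getElem_cons (show v < r.length by omega),
            List.drop_eq_getElem_cons hlt]
          simp only [lcp]
          rw [if_neg]
          · omega
          · intro hc
            exact hne (by rw [List.getD_eq_getElem r ' ' (by omega),
                List.getD_eq_getElem r ' ' hlt]; exact hc)
        · rw [show r.drop (i + v) = [] from List.drop_eq_nil_of_le (by omega), lcp_nil_right]
          omega
  exact H _ v le_rfl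

theorem extendZ_lcp (r : List Char) (i v : Nat) (h : v ≤ lcp r (r.drop i)) :
    extendZ r i v = lcp r (r.drop i) := by
  rw [extendZ_eq, lcp_add r (r.drop i) v h, List.drop_drop]

-- the Z-array loop invariant
def ZInv (r : List Char) (m : Nat) (st : List Nat × Nat × Nat) : Prop :=
  st.1.length = r.length ∧
  st.1.getD 0 0 = 0 ∧
  (∀ k, 1 ≤ k → k < m → st.1.getD k 0 = lcp r (r.drop k)) ∧
  ((st.2.1 = 0 ∧ st.2.2 = 0) ∨
   (1 ≤ st.2.1 ∧ st.2.1 < m ∧ st.2.2 = st.2.1 + lcp r (r.drop st.2.1)))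

theorem getD_set_self (l : List Nat) (i v : Nat) (h : i < l.length) :
    (l.set i v).getD i 0 = v := by
  simp [List.getD_eq_getElem?_getD, h]

theorem getD_set_ne (l : List Nat) (i k v : Nat) (h : k ≠ i) :
    (l.set i v).getD k 0 = l.getD k 0 := by
  simp [List.getD_eq_getElem?_getD, List.getElem?_set_ne (by omega : i ≠ k)]

theorem zstep_inv (r : List Char) (i : Nat) (st : List Nat × Nat × Nat)
    (hi : 1 ≤ i) (hin : i < r.length) (h : ZInv r i st) :
    ZInv r (i + 1) (zstep r st i) := by
  obtain ⟨z, zl, zr⟩ := st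
  obtain ⟨hlen, hz0, hzk, hdisj⟩ := h
  dsimp only at hlen hz0 hzk hdisj
  have hv0 : (if i < zr then min (zr - i) (z.getD (i - zl) 0) else 0) ≤ lcp r (r.drop i) := by
    split
    · rename_i hir
      rcases hdisj with ⟨h1, h2⟩ | ⟨h1, h2, h3⟩
      · omega
      · rw [hzk (i - zl) (by omega) (by omega)]
        have hL : lcp r (r.drop zl) ≤ r.length - zl := by
          have := lcp_le_right r (r.drop zl); simpa using this
        have hLJ : lcp r (r.drop (i - zl)) ≤ r.length := lcp_le_left _ _
        apply lcp_ge
        · omega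
        · simp; omega
        · intro t ht
          have ht1 : t < lcp r (r.drop (i - zl)) := by omega
          have e1 := lcp_get r (r.drop (i - zl)) t ht1
          rw [List.getElem?_drop] at e1
          have ht2 : (i - zl) + t < lcp r (r.drop zl) := by omega
          have e2 := lcp_get r (r.drop zl) _ ht2
          rw [List.getElem?_drop] at e2
          have e3 : zl + (i - zl + t) = i + t := by omega
          rw [List.getElem?_drop, e1, e2, e3]
    · exact Nat.zero_le _
  simp only [zstep]
  rw [extendZ_lcp r i _ hv0]
  unfold ZInv
  split <;> dsimp only <;>
    refine ⟨by simp [hlen], by rw [getD_set_ne _ _ _ _ (by omega)]; exact hz0, ?_, ?_⟩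
  · intro k hk1 hk2
    rcases Nat.lt_or_ge k i with hki | hki
    · rw [getD_set_ne _ _ _ _ (by omega)]; exact hzk k hk1 hki
    · have : k = i := by omega
      subst this
      exact getD_set_self _ _ _ (by omega)
  · right; exact ⟨hi, by omega, rfl⟩
  · intro k hk1 hk2
    rcases Nat.lt_or_ge k i with hki | hki
    · rw [getD_set_ne _ _ _ _ (by omega)]; exact hzk k hk1 hki
    · have : k = i := by omega
      subst this
      exact getD_set_self _ _ _ (by omega)
  · rcases hdisj with ⟨h1, h2⟩ | ⟨h1, h2, h3⟩
    · left; exact ⟨h1, h2⟩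
    · right; exact ⟨h1, by omega, h3⟩

theorem zfold_go (r : List Char) (cnt : Nat) : ∀ (a : Nat) (st : List Nat × Nat × Nat),
    1 ≤ a → a + cnt ≤ r.length → ZInv r a st →
    ZInv r (a + cnt) ((List.range' a cnt).foldl (zstep r) st) := by
  induction cnt with
  | zero => intro a st _ _ h; simpa using h
  | succ c ih =>
    intro a st ha hac h
    rw [List.range'_succ, List.foldl_cons]
    have := ih (a + 1) (zstep r st a) (by omega) (by omega)
      (zstep_inv r a st ha (by omega) h)
    have e : a + 1 + c = a + (c + 1) := by omega
    rwa [e] at this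

theorem getD_replicate_zero (n k : Nat) : (List.replicate n (0 : Nat)).getD k 0 = 0 := by
  rcases Nat.lt_or_ge k n with h | h
  · simp [List.getD_eq_getElem?_getD, h]
  · simp [List.getD_eq_getElem?_getD,
      List.getElem?_eq_none (l := List.replicate n (0 : Nat)) (by simpa using h)]

theorem zfold_inv (r : List Char) (n : Nat) (hn : n = r.length) :
    ZInv r n ((List.range' 1 (n - 1)).foldl (zstep r) (List.replicate n 0, 0, 0)) := by
  have hinit : ZInv r 1 (List.replicate n 0, 0, 0) := by
    refine ⟨by simp [hn], getD_replicate_zero n 0, ?_, Or.inl ⟨rfl, rfl⟩⟩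
    intro k hk1 hk2; omega
  rcases Nat.eq_zero_or_pos n with h0 | hpos
  · subst h0
    simp only [Nat.zero_sub, List.range'_zero, List.foldl_nil]
    exact ⟨by simp [hn], getD_replicate_zero 0 0, by omega, Or.inl ⟨rfl, rfl⟩⟩
  · have := zfold_go r (n - 1) 1 (List.replicate n 0, 0, 0) le_rfl (by omega) hinit
    have e : 1 + (n - 1) = n := by omega
    rwa [e] at this

-- block equality on t expressed through the Z-function of the reversed list
theorem take_eq_take_iff_lcp (a b : List Char) (k : Nat) (ha : k ≤ a.length)
    (hb : k ≤ b.length) : a.take k = b.take k ↔ k ≤ lcp a b := by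
  induction k generalizing a b with
  | zero => simp
  | succ k' ih =>
    cases a with
    | nil => simp at ha
    | cons x xs =>
      cases b with
      | nil => simp at hb
      | cons y ys =>
        simp only [List.take_succ_cons, List.cons.injEq, lcp]
        constructor
        · rintro ⟨hxy, htk⟩
          rw [if_pos hxy]
          have := (ih xs ys (by simpa using ha) (by simpa using hb)).mp htk
          omega
        · intro h
          split at h
          · rename_i hxy
            exact ⟨hxy, (ih xs ys (by simpa using ha) (by simpa using hb)).mpr (by omega)⟩
          · omega

theorem blockEq_iff_lcp (t : List Char) (k : Nat) (hk : 1 ≤ k) (h2 : 2 * k ≤ t.length) :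
    (t.drop (t.length - k) = (t.drop (t.length - 2 * k)).take k) ↔
      k ≤ lcp t.reverse (t.reverse.drop k) := by
  have hkn : k ≤ t.length := by omega
  have e1 : t.reverse.take k = (t.drop (t.length - k)).reverse :=
    List.take_reverse
  have e2 : (t.reverse.drop k).take k = ((t.drop (t.length - 2 * k)).take k).reverse := by
    rw [List.drop_reverse, List.take_reverse]
    have e : (t.take (t.length - k)).length - k = t.length - k - k := by rw [List.length_take]; omega
    have e3 : t.length - k - k = t.length - 2 * k := by omega
    have e4 : (t.length - k) - (t.length - 2 * k) = k := by omega
    rw [e, List.drop_take, e3, e4]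
  rw [← take_eq_take_iff_lcp _ _ k (by simp; omega) (by simp; omega), e1, e2]
  constructor
  · intro h; rw [h]
  · intro h; exact List.reverse_injective h

-- characterisation of A's countdown loop
theorem checkGo_spec (t : List Char) (j : Nat) (hj : j < t.length) :
    checkGo t (t.length : Int) (PySem.List.pyRange (j : Int) (-1) (-1)) =
      some (decide (¬ ∃ k : Nat, k < t.length + 1 ∧ t.length - j ≤ k ∧ 2 * k ≤ t.length ∧
        t.drop (t.length - k) = (t.drop (t.length - 2 * k)).take k)) := by
  induction j with
  | zero =>
    rw [PySem.List.pyRange_neg_one_cons (by simp : (-1 : Int) < ((0 : Nat) : Int))]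
    rw [show ((0 : Nat) : Int) - 1 = (-1 : Int) by simp]
    rw [PySem.List.pyRange_neg_one_eq_nil le_rfl]
    simp only [checkGo]
    rw [PySem.List.slice_natCast, List.drop_zero, List.take_of_length_le (by omega)]
    rw [if_neg (by omega : ¬ ((t.length : Int) * 2 ≤ (t.length : Int)))]
    have hno : ¬ ∃ k : Nat, k < t.length + 1 ∧ t.length - 0 ≤ k ∧ 2 * k ≤ t.length ∧
        t.drop (t.length - k) = (t.drop (t.length - 2 * k)).take k := by
      rintro ⟨k, h1, h2, h3, _⟩; omega
    rw [decide_eq_true hno]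
  | succ j' ih =>
    have hj' : j' < t.length := by omega
    rw [PySem.List.pyRange_neg_one_cons (by omega : (-1 : Int) < ((j' + 1 : Nat) : Int))]
    rw [show ((j' + 1 : Nat) : Int) - 1 = ((j' : Nat) : Int) by push_cast; ring]
    simp only [checkGo]
    rw [PySem.List.slice_natCast, List.take_of_length_le (by rw [List.length_drop])]
    rw [List.length_drop]
    by_cases hcond : 2 * (t.length - (j' + 1)) ≤ t.length
    · rw [if_pos (by omega : ((t.length - (j' + 1) : Nat) : Int) * 2 ≤ (t.length : Int))]
      rw [show ((j' + 1 : Nat) : Int) - ((t.length - (j' + 1) : Nat) : Int) =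
        (((j' + 1) - (t.length - (j' + 1)) : Nat) : Int) by omega]
      rw [PySem.List.slice_natCast]
      by_cases heq : t.drop (j' + 1) =
          (t.drop ((j' + 1) - (t.length - (j' + 1)))).take ((j' + 1) - ((j' + 1) - (t.length - (j' + 1))))
      · rw [if_pos heq]
        have hex : ∃ k : Nat, k < t.length + 1 ∧ t.length - (j' + 1) ≤ k ∧ 2 * k ≤ t.length ∧
            t.drop (t.length - k) = (t.drop (t.length - 2 * k)).take k := by
          refine ⟨t.length - (j' + 1), by omega, le_rfl, by omega, ?_⟩
          rw [show t.length - (t.length - (j' + 1)) = j' + 1 by omega,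
            show t.length - 2 * (t.length - (j' + 1)) = (j' + 1) - (t.length - (j' + 1)) by omega]
          rw [show (j' + 1) - ((j' + 1) - (t.length - (j' + 1))) = t.length - (j' + 1) by omega] at heq
          exact heq
        rw [decide_eq_false (not_not_intro hex)]
      · rw [if_neg heq, ih hj']
        congr 1
        rw [decide_eq_decide]
        apply not_congr
        constructor
        · rintro ⟨k, h1, h2, h3, h4⟩
          exact ⟨k, h1, by omega, h3, h4⟩
        · rintro ⟨k, h1, h2, h3, h4⟩
          rcases Nat.lt_or_ge k (t.length - j') with hk | hk
          · exfalso
            have hkk : k = t.length - (j' + 1) := by omega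
            subst hkk
            rw [show t.length - (t.length - (j' + 1)) = j' + 1 by omega,
              show t.length - 2 * (t.length - (j' + 1)) = (j' + 1) - (t.length - (j' + 1)) by omega]
              at h4
            rw [show (j' + 1) - ((j' + 1) - (t.length - (j' + 1))) = t.length - (j' + 1) by omega]
              at heq
            exact heq h4
          · exact ⟨k, h1, hk, h3, h4⟩
    · rw [if_neg (by omega : ¬ ((t.length - (j' + 1) : Nat) : Int) * 2 ≤ (t.length : Int))]
      have hno : ¬ ∃ k : Nat, k < t.length + 1 ∧ t.length - (j' + 1) ≤ k ∧ 2 * k ≤ t.length ∧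
          t.drop (t.length - k) = (t.drop (t.length - 2 * k)).take k := by
        rintro ⟨k, h1, h2, h3, _⟩; omega
      rw [decide_eq_true hno]

-- ===== VERDICT (by name: the statement is the Claim_ definition above) =====
theorem check_spec : Claim_equal_check := by
  intro s _
  unfold Spec_check
  simp only [check, check_alt]
  rcases Nat.eq_zero_or_pos s.toList.length with h0 | hpos
  · rw [if_pos h0]
    rw [show ((s.toList.length : Int) - 1) = (-1 : Int) by simp [h0]]
    rw [PySem.List.pyRange_neg_one_eq_nil le_rfl]
    rfl
  · rw [if_neg (by omega)]
    rw [show ((s.toList.length : Int) - 1) = ((s.toList.length - 1 : Nat) : Int) by omega]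
    rw [checkGo_spec s.toList (s.toList.length - 1) (by omega)]
    obtain ⟨hzlen, hz0, hzk, -⟩ :=
      zfold_inv s.toList.reverse s.toList.length (by simp)
    congr 1
    rw [decide_not]
    congr 1
    have hiff : (((List.range' 1 (s.toList.length / 2)).any fun k =>
        decide (k ≤ ((List.range' 1 (s.toList.length - 1)).foldl (zstep s.toList.reverse)
          (List.replicate s.toList.length 0, 0, 0)).1.getD k 0)) = true) ↔
        (∃ k : Nat, k < s.toList.length + 1 ∧
          s.toList.length - (s.toList.length - 1) ≤ k ∧ 2 * k ≤ s.toList.length ∧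
          s.toList.drop (s.toList.length - k) =
            (s.toList.drop (s.toList.length - 2 * k)).take k) := by
      rw [List.any_eq_true]
      constructor
      · rintro ⟨k, hmem, hp⟩
        rw [List.mem_range'_1] at hmem
        have h2k : 2 * k ≤ s.toList.length := by omega
        have hkn : k < s.toList.length := by omega
        rw [decide_eq_true_eq, hzk k (by omega) hkn] at hp
        exact ⟨k, by omega, by omega, h2k,
          (blockEq_iff_lcp s.toList k (by omega) h2k).mpr hp⟩
      · rintro ⟨k, h1, h2, h3, h4⟩
        have hk1 : 1 ≤ k := by omega
        refine ⟨k, List.mem_range'_1.mpr ⟨hk1, by omega⟩, ?_⟩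
        rw [decide_eq_true_eq, hzk k hk1 (by omega)]
        exact (blockEq_iff_lcp s.toList k hk1 h3).mp h4
    rw [Bool.eq_iff_iff, decide_eq_true_eq]
    exact hiff.symm
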